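-- pv_equiv track=rewrite | github.com/AnthonyKamers/mtss-signer | performance/belongingness_table.py | find_index_element
-- ===== SOURCE A (Python) =====
-- def find_index_element(row):
--     index_element = 0
--     for k, element in enumerate(row):
--         if k == 0:
--             continue
--
--         if element == 1:
--             index_element = k
--
--     return index_element
-- ===== SOURCE B (Python) =====
-- def find_index_element(row):
--     for k in range(len(row) - 1, 0, -1):
--         if row[k] == 1:
--             return k
--     return 0
-- ===== Notes on version B (the rewrite author's own statement) =====
-- stated objective: idiomatic
-- what changed: B scans the row backwards from the last index down to 1 and returns immediately on the first element equal to 1 (default 0), instead of A's forward pass that keeps updating a last-hit accumulator.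
import Mathlib
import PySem

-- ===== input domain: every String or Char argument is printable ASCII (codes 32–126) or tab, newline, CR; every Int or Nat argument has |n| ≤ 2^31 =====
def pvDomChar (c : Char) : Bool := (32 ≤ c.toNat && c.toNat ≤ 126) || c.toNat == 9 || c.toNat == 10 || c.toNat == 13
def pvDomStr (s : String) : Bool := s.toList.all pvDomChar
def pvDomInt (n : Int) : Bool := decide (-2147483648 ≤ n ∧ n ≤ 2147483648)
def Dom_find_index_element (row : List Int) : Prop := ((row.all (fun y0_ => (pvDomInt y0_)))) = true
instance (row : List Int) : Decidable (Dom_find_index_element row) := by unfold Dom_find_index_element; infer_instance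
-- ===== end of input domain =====

-- B replaces A's forward last-hit accumulator by a backward scan with early exit (idiomatic, same cost).

-- ===== PORT A =====
-- forward pass: for k, element in enumerate(row): skip k == 0; record k when element == 1
def find_index_element (row : List Int) : Int :=
  (PySem.List.enumerate row).foldl
    (fun index_element p => if p.1 = 0 then index_element
      else if p.2 = 1 then p.1 else index_element) 0

-- ===== PORT B =====
-- backward scan k = len-1, …, 1; return k on first row[k] == 1, else 0.
-- row[k] is always in range in Source B (1 ≤ k ≤ len-1), so getD's default is never used.
def fieAux (row : List Int) : Nat → Int
  | 0 => 0
  | k + 1 => if row.getD (k + 1) 0 = 1 then ((k : Int) + 1) else fieAux row k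

def find_index_element_alt (row : List Int) : Int := fieAux row (row.length - 1)

-- ===== PRECONDITION & SPEC =====
def Spec_find_index_element (row : List Int) (out : Int) : Prop := out = find_index_element_alt row
instance (row : List Int) (out : Int) : Decidable (Spec_find_index_element row out) := by unfold Spec_find_index_element; infer_instance

-- ===== CLAIM (what is proved, stated in full; the proofs are below) =====
def Claim_equal_find_index_element : Prop := ∀ (row : List Int), Dom_find_index_element row → Spec_find_index_element row (find_index_element row)

-- ===== LEMMAS AND PROOFS =====
theorem fieAux_append (row : List Int) (x : Int) (j : Nat) (h : j < row.length) :
    fieAux (row ++ [x]) j = fieAux row j := by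
  induction j with
  | zero => rfl
  | succ k ih =>
    have hget : (row ++ [x]).getD (k + 1) 0 = row.getD (k + 1) 0 := by
      simp [List.getD_eq_getElem?_getD, List.getElem?_append_left h]
    simp only [fieAux, hget]
    split
    · rfl
    · exact ih (Nat.lt_of_succ_lt h)

theorem fie_eq (row : List Int) : find_index_element row = find_index_element_alt row := by
  induction row using List.reverseRecOn with
  | nil => rfl
  | append_singleton row x ih =>
    cases row with
    | nil => rfl
    | cons y ys =>
      have hlen : ((y :: ys) ++ [x]).length - 1 = ys.length + 1 := by simp
      have hApp : find_index_element ((y :: ys) ++ [x]) =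
          (if x = 1 then ((ys.length : Int) + 1) else find_index_element (y :: ys)) := by
        have h0 : (1 : Int) + (ys.length : Int) ≠ 0 := by positivity
        simp [find_index_element, PySem.List.enumerate_append, List.foldl_append,
          PySem.List.enumerate, h0]
        rcases eq_or_ne x 1 with hx | hx <;> simp [hx, add_comm]
      have hgetx : ((y :: ys) ++ [x]).getD (ys.length + 1) 0 = x := by
        simp [List.getD_eq_getElem?_getD]
      have hB : find_index_element_alt ((y :: ys) ++ [x]) =
          (if x = 1 then ((ys.length : Int) + 1) else find_index_element_alt (y :: ys)) := by
      -- unfold one step of the backward scan at index len-1 = ys.length+1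
        simp only [find_index_element_alt, hlen, fieAux, hgetx]
        split
        · rfl
        · have := fieAux_append (y :: ys) x ys.length (by simp)
          simpa [find_index_element_alt] using this
      rw [hApp, hB, ih]

-- ===== VERDICT (by name: the statement is the Claim_ definition above) =====
theorem find_index_element_spec : Claim_equal_find_index_element := by
  intro row _
  exact fie_eq row
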